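-- pv_equiv track=rewrite | github.com/pritamSarkar123/PYPrac2021OneJob | coding/compitatie not in site/psrtition_labels.py | create_range_dict
-- ===== SOURCE A (Python) =====
-- from collections import OrderedDict
--
-- def create_range_dict(message):
-- 	d = OrderedDict()
-- 	for i in range(len(message)):
-- 		c = message[i]
-- 		if c not in d:
-- 			d[c]=[i,i]
-- 		else:
-- 			d[c][-1]=i
-- 	return d
-- ===== SOURCE B (Python) =====
-- from collections import OrderedDict
--
-- def create_range_dict(message):
--     # Separate passes: first-occurrence dict (fixes key order), then a
--     # last-occurrence dict by overwriting, then combine.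
--     first = OrderedDict()
--     for i in range(len(message)):
--         c = message[i]
--         if c not in first:
--             first[c] = i
--     last = {}
--     for i in range(len(message)):
--         last[message[i]] = i
--     return OrderedDict((c, [f, last[c]]) for c, f in first.items())
-- ===== Notes on version B (the rewrite author's own statement) =====
-- stated objective: alternative
-- what changed: Replaces the single loop that mutates the stored [first,last] pair in place by three independent passes: a first-occurrence dict, a last-occurrence dict built by overwriting, and a final combining comprehension.
import Mathlib
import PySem

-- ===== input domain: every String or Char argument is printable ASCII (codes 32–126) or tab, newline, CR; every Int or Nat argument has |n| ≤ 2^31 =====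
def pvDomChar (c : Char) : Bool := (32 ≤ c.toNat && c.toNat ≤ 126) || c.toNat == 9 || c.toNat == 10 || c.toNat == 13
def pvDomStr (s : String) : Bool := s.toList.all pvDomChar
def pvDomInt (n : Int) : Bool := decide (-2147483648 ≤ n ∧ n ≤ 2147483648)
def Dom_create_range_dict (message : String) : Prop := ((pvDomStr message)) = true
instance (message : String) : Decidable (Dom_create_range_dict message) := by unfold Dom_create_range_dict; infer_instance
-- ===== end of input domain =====

-- B replaces A's single in-place-mutating loop by three independent passes (first-occurrence
-- dict, last-occurrence dict by overwrite, combining map); same cost, different decomposition.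

-- ===== PORT A =====
-- for i in range(len(message)): c = message[i]; if c not in d: d[c]=[i,i] else: d[c][-1]=i
-- d[c][-1]=i on the stored 2-element list is ported as modify with (v.dropLast ++ [i])
-- (assignment at index -1 of a nonempty list); the stored lists always have length 2.
def create_range_dict (message : String) : List (String × List Int) :=
  ((PySem.List.enumerate message.toList).foldl
    (fun d p =>
      let c := String.singleton p.2
      if d.contains c = false then d.insert c [p.1, p.1]
      else d.modify c [] (fun v => v.dropLast ++ [p.1]))
    PySem.Dict.empty).items

-- ===== PORT B =====
-- first pass: first-occurrence indices (key order); second pass: last occurrence by overwrite;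
-- last[c] is ported via get?;.getD 0 — the key is always present (first's keys ⊆ last's keys).
def create_range_dict_alt (message : String) : List (String × List Int) :=
  let first := (PySem.List.enumerate message.toList).foldl
    (fun d p =>
      if d.contains (String.singleton p.2) = false then d.insert (String.singleton p.2) p.1
      else d)
    PySem.Dict.empty
  let last := (PySem.List.enumerate message.toList).foldl
    (fun d p => d.insert (String.singleton p.2) p.1)
    PySem.Dict.empty
  first.items.map (fun q => (q.1, [q.2, (last.get? q.1).getD 0]))

-- ===== PRECONDITION & SPEC =====
def Spec_create_range_dict (message : String) (out : List (String × List Int)) : Prop := out = create_range_dict_alt message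
instance (message : String) (out : List (String × List Int)) : Decidable (Spec_create_range_dict message out) := by unfold Spec_create_range_dict; infer_instance

-- ===== CLAIM (what is proved, stated in full; the proofs are below) =====
def Claim_equal_create_range_dict : Prop := ∀ (message : String), Dom_create_range_dict message → Spec_create_range_dict message (create_range_dict message)

-- ===== LEMMAS AND PROOFS =====

lemma crd_key : ∀ (l : List (Int × Char)) (dA : PySem.Dict String (List Int))
    (dF dL : PySem.Dict String Int),
    dF.keys.Nodup →
    dA.items = dF.items.map (fun q => (q.1, [q.2, dL.getD q.1 0])) →
    (l.foldl (fun d p =>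
        let c := String.singleton p.2
        if d.contains c = false then d.insert c [p.1, p.1]
        else d.modify c [] (fun v => v.dropLast ++ [p.1])) dA).items
      = ((l.foldl (fun d p =>
            if d.contains (String.singleton p.2) = false then d.insert (String.singleton p.2) p.1
            else d) dF).items).map
          (fun q => (q.1, [q.2, (l.foldl (fun d p => d.insert (String.singleton p.2) p.1) dL).getD q.1 0])) := by
  intro l
  induction l with
  | nil => intro dA dF dL _ h; simpa using h
  | cons p l ih =>
    intro dA dF dL hnd h
    have hkeys : dA.keys = dF.keys := by
      simp only [PySem.Dict.keys, h, List.map_map]; rfl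
    have hcont : ∀ k, dA.contains k = dF.contains k := by
      intro k
      rw [PySem.Dict.contains_eq_decide_mem_keys, PySem.Dict.contains_eq_decide_mem_keys, hkeys]
    simp only [List.foldl_cons]
    by_cases hc : dF.contains (String.singleton p.2) = false
    · -- fresh key: both sides insert
      rw [show (if dA.contains (String.singleton p.2) = false then
            dA.insert (String.singleton p.2) [p.1, p.1]
          else dA.modify (String.singleton p.2) [] (fun v => v.dropLast ++ [p.1]))
          = dA.insert (String.singleton p.2) [p.1, p.1] by rw [hcont]; simp [hc]]
      rw [if_pos hc]
      apply ih
      · exact PySem.Dict.nodup_keys_insert _ _ _ hnd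
      · rw [PySem.Dict.items_insert_of_not_contains _ _ (by rw [hcont]; exact hc),
            PySem.Dict.items_insert_of_not_contains _ _ hc, List.map_append]
        congr 1
        · rw [h]
          apply List.map_congr_left
          intro q hq
          have hne : q.1 ≠ String.singleton p.2 := by
            intro he
            have : dF.contains q.1 = true := by
              rw [PySem.Dict.contains_eq_decide_mem_keys]
              exact decide_eq_true (List.mem_map_of_mem hq)
            rw [he] at this; rw [this] at hc; exact absurd hc (by simp)
          rw [PySem.Dict.getD_insert_of_ne _ _ _ hne]
        · simp [PySem.Dict.getD_insert_self]
    · -- existing key: A modifies in place, B's first-dict is unchanged, last-dict overwrites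
      have hc' : dF.contains (String.singleton p.2) = true := by
        cases hq : dF.contains (String.singleton p.2) with
        | false => exact absurd hq hc
        | true => rfl
      rw [show (if dA.contains (String.singleton p.2) = false then
            dA.insert (String.singleton p.2) [p.1, p.1]
          else dA.modify (String.singleton p.2) [] (fun v => v.dropLast ++ [p.1]))
          = dA.modify (String.singleton p.2) [] (fun v => v.dropLast ++ [p.1]) by
            rw [hcont]; simp [hc']]
      rw [if_neg hc]
      apply ih
      · exact hnd
      · have hndA : dA.keys.Nodup := by rw [hkeys]; exact hnd
        show (dA.insert (String.singleton p.2)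
            ((fun v => v.dropLast ++ [p.1]) (dA.getD (String.singleton p.2) []))).items = _
        rw [PySem.Dict.items_insert_of_contains _ _ (by rw [hcont]; exact hc'), h,
            List.map_map]
        apply List.map_congr_left
        intro q hq
        by_cases hqe : q.1 = String.singleton p.2
        · have hmem : (q.1, [q.2, dL.getD q.1 0]) ∈ dA.items := by
            rw [h]; exact List.mem_map_of_mem hq
          have hval : dA.getD q.1 [] = [q.2, dL.getD q.1 0] :=
            PySem.Dict.getD_of_mem_items _ hmem hndA _
          have hval' : dA.getD (String.singleton p.2) []
              = [q.2, dL.getD (String.singleton p.2) 0] := by rw [← hqe]; exact hval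
          simp only [Function.comp_apply, hqe, beq_self_eq_true, if_true]
          rw [hval']
          simp [PySem.Dict.getD_insert_self]
        · simp only [Function.comp_apply,
            show (q.1 == String.singleton p.2) = false from beq_eq_false_iff_ne.mpr hqe,
            Bool.false_eq_true, if_false]
          rw [PySem.Dict.getD_insert_of_ne _ _ _ hqe]

-- ===== VERDICT (by name: the statement is the Claim_ definition above) =====
theorem create_range_dict_spec : Claim_equal_create_range_dict := by
  intro message _
  show create_range_dict message = create_range_dict_alt message
  unfold create_range_dict create_range_dict_alt
  rw [crd_key (PySem.List.enumerate message.toList) PySem.Dict.empty PySem.Dict.empty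
      PySem.Dict.empty (by simp [PySem.Dict.keys_empty]) (by rfl)]
  apply List.map_congr_left
  intro q _
  rw [PySem.Dict.getD_eq_get?_getD]
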